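-- pv_equiv track=rewrite | github.com/golam-m-hossain/anubadok | anubadok/en_pp.py | process_for_interrogation_adjustment
-- ===== SOURCE A (Python) =====
-- def process_for_interrogation_adjustment(sentence_input: list) -> list:
--     """
--     Check for 'how many' pattern and concatenate them
--     """
--     sentence_output = []
--     word_position = 0
--     last_how_position = 0
--     word_how_ind = False
--
--     for sts in sentence_input:
--         wds_array = sts.split('\t')
--         wds_array.extend([''] * (3 - len(wds_array)))  # Ensure at least 3 elements
--
--         if wds_array[1] == "WRB" and wds_array[0].lower() == 'how':
--             last_how_position = word_position
--             sentence_output.append(sts)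
--             word_how_ind = True
--         elif word_how_ind and wds_array[1] in {"RB", "JJ"}:
--             word_how_ind = False  # reset
--
--             if word_position == last_how_position + 1:
--                 ppst = sentence_output[last_how_position]
--                 wds_tmp_array = ppst.split('\t')
--
--                 ppst = (
--                     f"{wds_tmp_array[0]}.{wds_array[0]}\t"
--                     f"{wds_tmp_array[1]}\t"
--                     f"{wds_tmp_array[0].lower()}.{wds_array[0].lower()}"
--                 )
--
--                 # Replace "how" with concatenated version
--                 sentence_output[last_how_position] = ppst
--                 word_position -= 1  # adjust position counter
--             else:
--                 sentence_output.append(sts)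
--         else:
--             sentence_output.append(sts)
--
--         word_position += 1
--
--     return sentence_output
-- ===== SOURCE B (Python) =====
-- def process_for_interrogation_adjustment(sentence_input: list) -> list:
--     """Single forward pass with lookahead: merge an adjacent 'how'/WRB + RB/JJ pair."""
--     def fields(s):
--         f = s.split('\t')
--         f += [''] * (3 - len(f))
--         return f
--
--     out = []
--     i = 0
--     n = len(sentence_input)
--     while i < n:
--         cur = sentence_input[i]
--         f = fields(cur)
--         if f[1] == "WRB" and f[0].lower() == 'how' and i + 1 < n:
--             g = fields(sentence_input[i + 1])
--             if g[1] in ("RB", "JJ"):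
--                 out.append(f"{f[0]}.{g[0]}\t{f[1]}\t{f[0].lower()}.{g[0].lower()}")
--                 i += 2
--                 continue
--         out.append(cur)
--         i += 1
--     return out
-- ===== Notes on version B (the rewrite author's own statement) =====
-- stated objective: simpler
-- what changed: Replaces the stateful flag/position-counter pass that appends then destructively patches the output list with a stateless index-based lookahead pass that emits the merged token directly and consumes both inputs.
import Mathlib
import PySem

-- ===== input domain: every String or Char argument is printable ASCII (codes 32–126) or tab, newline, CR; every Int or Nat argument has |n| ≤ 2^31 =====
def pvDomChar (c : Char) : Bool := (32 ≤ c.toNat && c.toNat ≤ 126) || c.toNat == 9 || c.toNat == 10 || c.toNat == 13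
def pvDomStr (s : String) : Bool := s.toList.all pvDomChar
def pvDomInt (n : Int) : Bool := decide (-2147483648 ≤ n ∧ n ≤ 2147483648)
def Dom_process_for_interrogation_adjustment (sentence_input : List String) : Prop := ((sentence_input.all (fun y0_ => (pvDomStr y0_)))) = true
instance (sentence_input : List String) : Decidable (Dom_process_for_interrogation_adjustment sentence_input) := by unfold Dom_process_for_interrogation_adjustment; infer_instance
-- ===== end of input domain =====

-- B replaces A's stateful append-then-patch pass (flag + position counters + in-place replacement)
-- by a stateless lookahead pass that emits the merged token directly; same return value, no speed claim.

-- ===== PORT A =====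
-- one iteration of A's for-loop; state = (sentence_output, word_position, last_how_position, word_how_ind)
def pvStepA (st : List String × Nat × Nat × Bool) (sts : String) : List String × Nat × Nat × Bool :=
  let (out, wp, lh, flag) := st
  -- wds_array = sts.split('\t'); wds_array.extend([''] * (3 - len(wds_array)))
  let ws := (PySem.Str.split? sts "\t").getD []
  let f := ws ++ List.replicate (3 - ws.length) ""
  if f.getD 1 "" = "WRB" ∧ PySem.Str.lower (f.getD 0 "") = "how" then
    (out ++ [sts], wp + 1, wp, true)
  else if flag = true ∧ (f.getD 1 "" = "RB" ∨ f.getD 1 "" = "JJ") then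
    if wp = lh + 1 then
      -- sentence_output[last_how_position]: in-range in every reachable state (lh < out.length), so getD is exact
      let t : List String := (PySem.Str.split? (out.getD lh "") "\t").getD []
      let ppst := t.getD 0 "" ++ "." ++ f.getD 0 "" ++ "\t" ++ t.getD 1 "" ++ "\t"
                  ++ PySem.Str.lower (t.getD 0 "") ++ "." ++ PySem.Str.lower (f.getD 0 "")
      (out.set lh ppst, (wp - 1) + 1, lh, false)
    else
      (out ++ [sts], wp + 1, lh, false)
  else
    (out ++ [sts], wp + 1, lh, flag)

def process_for_interrogation_adjustment (sentence_input : List String) : List String :=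
  (sentence_input.foldl pvStepA ([], 0, 0, false)).1

-- ===== PORT B =====
def pvFields (s : String) : List String :=
  let f := (PySem.Str.split? s "\t").getD []
  f ++ List.replicate (3 - f.length) ""

def pvIsHow (s : String) : Bool :=
  (pvFields s).getD 1 "" == "WRB" && PySem.Str.lower ((pvFields s).getD 0 "") == "how"

def pvIsRBJJ (s : String) : Bool :=
  (pvFields s).getD 1 "" == "RB" || (pvFields s).getD 1 "" == "JJ"

def pvMerge (x y : String) : String :=
  (pvFields x).getD 0 "" ++ "." ++ (pvFields y).getD 0 "" ++ "\t" ++ (pvFields x).getD 1 "" ++ "\t"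
  ++ PySem.Str.lower ((pvFields x).getD 0 "") ++ "." ++ PySem.Str.lower ((pvFields y).getD 0 "")

def pvGoB : List String → List String
  | [] => []
  | cur :: rest =>
    if pvIsHow cur then
      match rest with
      | next :: rest' =>
        if pvIsRBJJ next then pvMerge cur next :: pvGoB rest'
        else cur :: pvGoB (next :: rest')
      | [] => [cur]
    else cur :: pvGoB rest

def process_for_interrogation_adjustment_alt (sentence_input : List String) : List String :=
  pvGoB sentence_input

-- ===== PRECONDITION & SPEC =====
def Spec_process_for_interrogation_adjustment (sentence_input : List String) (out : List String) : Prop := out = process_for_interrogation_adjustment_alt sentence_input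
instance (sentence_input : List String) (out : List String) : Decidable (Spec_process_for_interrogation_adjustment sentence_input out) := by unfold Spec_process_for_interrogation_adjustment; infer_instance

-- ===== CLAIM (what is proved, stated in full; the proofs are below) =====
def Claim_equal_process_for_interrogation_adjustment : Prop := ∀ (sentence_input : List String), Dom_process_for_interrogation_adjustment sentence_input → Spec_process_for_interrogation_adjustment sentence_input (process_for_interrogation_adjustment sentence_input)

-- ===== LEMMAS AND PROOFS =====

lemma pvIsHow_iff (s : String) : pvIsHow s = true ↔
    ((pvFields s).getD 1 "" = "WRB" ∧ PySem.Str.lower ((pvFields s).getD 0 "") = "how") := by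
  simp [pvIsHow]

lemma pvIsRBJJ_iff (s : String) : pvIsRBJJ s = true ↔
    ((pvFields s).getD 1 "" = "RB" ∨ (pvFields s).getD 1 "" = "JJ") := by
  simp [pvIsRBJJ]

lemma pvRBJJ_of_how {s : String} (h : pvIsHow s = true) : pvIsRBJJ s = false := by
  rw [← Bool.not_eq_true]
  intro hr
  have h1 := ((pvIsHow_iff s).mp h).1
  rcases (pvIsRBJJ_iff s).mp hr with h2 | h2 <;> rw [h1] at h2 <;> exact absurd h2 (by decide)

lemma pvHow_of_not (s : String) (h : ¬ ((pvFields s).getD 1 "" = "WRB" ∧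
    PySem.Str.lower ((pvFields s).getD 0 "") = "how")) : pvIsHow s = false := by
  rw [← Bool.not_eq_true]
  intro hh
  exact h ((pvIsHow_iff s).mp hh)

lemma pvRBJJ_of_not (s : String) (h : ¬ ((pvFields s).getD 1 "" = "RB" ∨
    (pvFields s).getD 1 "" = "JJ")) : pvIsRBJJ s = false := by
  rw [← Bool.not_eq_true]
  intro hr
  exact h ((pvIsRBJJ_iff s).mp hr)

-- the tab-padding never changes a getD-with-"" lookup
lemma pvPad_getD (ws : List String) (i : Nat) :
    (ws ++ List.replicate (3 - ws.length) "").getD i "" = ws.getD i "" := by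
  rcases lt_or_ge i ws.length with h | h
  · exact List.getD_append ws (List.replicate (3 - ws.length) "") "" i h
  · rw [List.getD_eq_getElem?_getD, List.getD_eq_getElem?_getD, List.getElem?_append_right h,
       List.getElem?_replicate, List.getElem?_eq_none (by simpa using h)]
    split_ifs <;> rfl

lemma pvGet_last (out : List String) (x : String) : (out ++ [x]).getD out.length "" = x := by
  simp [List.getD_eq_getElem?_getD]

lemma pvSet_last (out : List String) (x p : String) :
    (out ++ [x]).set out.length p = out ++ [p] := by
  rw [List.set_append_right _ _ (Nat.le_refl _)]
  simp

lemma pvGoB_cons_not_how {cur : String} {rest : List String} (h : pvIsHow cur = false) :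
    pvGoB (cur :: rest) = cur :: pvGoB rest := by
  cases rest <;> simp [pvGoB, h]

-- the combined invariant, by strong induction on the list length:
-- (1) from any "safe" state (flag set only with the how-token strictly inside the output),
--     A's fold appends exactly pvGoB of the remaining input;
-- (2) from the state right after appending a how-token, A's fold produces pvGoB of (how :: rest).
lemma pvMainAux : ∀ n (l : List String), l.length ≤ n →
    ((∀ (out : List String) (lh : Nat) (flag : Bool), (flag = true → lh + 1 < out.length) →
       (List.foldl pvStepA (out, out.length, lh, flag) l).1 = out ++ pvGoB l)
     ∧ (∀ (out : List String) (x : String), pvIsHow x = true →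
       (List.foldl pvStepA (out ++ [x], out.length + 1, out.length, true) l).1 = out ++ pvGoB (x :: l))) := by
  intro n
  induction n with
  | zero =>
    intro l hl
    have hnil : l = [] := List.eq_nil_of_length_eq_zero (Nat.le_zero.mp hl)
    subst hnil
    constructor
    · intro out lh flag _
      rw [List.foldl_nil, pvGoB, List.append_nil]
    · intro out x hx
      rw [List.foldl_nil]
      show out ++ [x] = out ++ pvGoB [x]
      rw [pvGoB, if_pos hx]
  | succ n ih =>
    intro l hl
    constructor
    · -- (1) safe states
      intro out lh flag hsafe
      match l, hl with
      | [], _ => rw [List.foldl_nil, pvGoB, List.append_nil]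
      | cur :: rest, hl =>
        have hrest : rest.length ≤ n := by simpa using Nat.le_of_succ_le_succ hl
        rw [List.foldl_cons]
        simp only [pvStepA]
        split_ifs with hc1 hc2 hc3
        · -- how-branch: delegate to the how-state invariant
          exact (ih rest hrest).2 out cur ((pvIsHow_iff cur).mpr hc1)
        · -- elif + adjacent: impossible from a safe state
          exact absurd hc3 (by have := hsafe hc2.1; omega)
        · -- elif fires, not adjacent: plain append, flag reset
          have h := (ih rest hrest).1 (out ++ [cur]) lh false (by simp)
          simp only [List.length_append, List.length_cons, List.length_nil,
            List.append_assoc, List.singleton_append] at h ⊢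
          rw [h, pvGoB_cons_not_how (pvHow_of_not cur hc1)]
        · -- plain else-branch
          have h := (ih rest hrest).1 (out ++ [cur]) lh flag
            (fun hf => by have := hsafe hf; simp; omega)
          simp only [List.length_append, List.length_cons, List.length_nil,
            List.append_assoc, List.singleton_append] at h ⊢
          rw [h, pvGoB_cons_not_how (pvHow_of_not cur hc1)]
    · -- (2) state right after appending a how-token x
      intro out x hx
      match l, hl with
      | [], _ =>
        rw [List.foldl_nil]
        show out ++ [x] = out ++ pvGoB [x]
        rw [pvGoB, if_pos hx]
      | y :: rest, hl =>
        have hrest : rest.length ≤ n := by simpa using Nat.le_of_succ_le_succ hl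
        rw [List.foldl_cons]
        simp only [pvStepA]
        split_ifs with hc1 hc2
        · -- a second how-token: re-enter the how-state with a longer output
          have hyhow : pvIsHow y = true := (pvIsHow_iff y).mpr hc1
          have h := (ih rest hrest).2 (out ++ [x]) y hyhow
          simp only [List.length_append, List.length_cons, List.length_nil,
            List.append_assoc, List.singleton_append] at h ⊢
          rw [h]
          simp [pvGoB, hx, pvRBJJ_of_how hyhow]
        · -- adjacent RB/JJ: the merge happens
          have hyr : pvIsRBJJ y = true := (pvIsRBJJ_iff y).mpr hc2.2
          rw [pvGet_last, pvSet_last]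
          have hm : ((PySem.Str.split? x "\t").getD []).getD 0 "" ++ "." ++
              ((PySem.Str.split? y "\t").getD [] ++ List.replicate (3 - ((PySem.Str.split? y "\t").getD []).length) "").getD 0 "" ++ "\t" ++ ((PySem.Str.split? x "\t").getD []).getD 1 "" ++ "\t"
              ++ PySem.Str.lower (((PySem.Str.split? x "\t").getD []).getD 0 "") ++ "." ++
              PySem.Str.lower (((PySem.Str.split? y "\t").getD [] ++ List.replicate (3 - ((PySem.Str.split? y "\t").getD []).length) "").getD 0 "") = pvMerge x y := by
            simp only [pvMerge, pvFields, pvPad_getD]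
          rw [hm]
          have h := (ih rest hrest).1 (out ++ [pvMerge x y]) out.length false (by simp)
          simp only [List.length_append, List.length_cons, List.length_nil,
            List.append_assoc, List.singleton_append, Nat.add_sub_cancel] at h ⊢
          rw [h]
          simp [pvGoB, hx, hyr]
        · -- neither how nor RB/JJ: plain append, flag stays set but safely non-adjacent
          have h := (ih rest hrest).1 (out ++ [x] ++ [y]) out.length true (by simp)
          simp only [List.length_append, List.length_cons, List.length_nil,
            List.append_assoc, List.singleton_append] at h ⊢
          rw [h]
          simp [pvGoB, hx, pvRBJJ_of_not y (fun hd => hc2 ⟨trivial, hd⟩),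
            pvGoB_cons_not_how (pvHow_of_not y hc1)]

-- ===== VERDICT (by name: the statement is the Claim_ definition above) =====
theorem process_for_interrogation_adjustment_spec : Claim_equal_process_for_interrogation_adjustment := by
  intro l _
  show _ = _
  have h := (pvMainAux l.length l le_rfl).1 [] 0 false (by simp)
  simpa [process_for_interrogation_adjustment, process_for_interrogation_adjustment_alt] using h
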